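-- pv_equiv track=rewrite | github.com/estansifer/cyoa | chocolate.py | compute_losers
-- ===== SOURCE A (Python) =====
-- def valid_move(a, b):
--     bite = None
--     n = len(a)
--     for i in range(0, n):
--         if a[i] < b[i]:
--             return False
--         if a[i] > b[i]:
--             if (bite is None) or (bite == b[i]):
--                 bite = b[i]
--             else:
--                 return False
--     return not (bite is None)
--
-- def next(a, k):
--     n = len(a)
--     i = n - 1
--     while a[i] == k:
--         i -= 1
--     a[i] += 1
--     for j in range(i + 1, n):
--         a[j] = a[i]
--
-- def compute_losers(n, k):
--     losers = []
--     a = n * [0]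
--
--     while a[0] < k:
--         next(a, k)
--         if choose_move(a, losers) is None:
--             losers.append(a[:])
--
--     return losers
--
-- def choose_move(a, losers):
--     for loser in losers:
--         if valid_move(a, loser):
--             return loser
--     return None
-- ===== SOURCE B (Python) =====
-- def compute_losers(n, k):
--     # Push/pull flip of the winner test: instead of scanning all known losers with
--     # valid_move, directly generate every losing-candidate predecessor (lower one
--     # contiguous block of a to a single value) and look it up in a hash set.
--     losers = []
--     loser_set = set()
--     a = n * [0]
--
--     while a[0] < k:
--         # advance a to the next non-decreasing position (same order as before)
--         i = n - 1
--         while a[i] == k: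
--             i -= 1
--         a[i] += 1
--         for j in range(i + 1, n):
--             a[j] = a[i]
--
--         if not _has_losing_move(a, loser_set):
--             losers.append(a[:])
--             loser_set.add(tuple(a))
--
--     return losers
--
-- def _has_losing_move(a, loser_set):
--     n = len(a)
--     for s in range(n):
--         lo = a[s - 1] if s > 0 else 0
--         for v in range(lo, a[s]):
--             head = tuple(a[:s])
--             for e in range(s, n):
--                 if head + (v,) * (e - s + 1) + tuple(a[e + 1:]) in loser_set:
--                     return True
--     return False
-- ===== Notes on version B (the rewrite author's own statement) =====
-- stated objective: alternative
-- what changed: The per-position linear scan over all previously found losers (choose_move/valid_move) is replaced by directly generating every candidate predecessor (lowering one contiguous block of the non-decreasing position to a single value) and testing each with an O(1) hash-set lookup of known losers.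
-- outside the precondition, e.g. on compute_losers(0, 3): A raises IndexError, B raises IndexError
import Mathlib
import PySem

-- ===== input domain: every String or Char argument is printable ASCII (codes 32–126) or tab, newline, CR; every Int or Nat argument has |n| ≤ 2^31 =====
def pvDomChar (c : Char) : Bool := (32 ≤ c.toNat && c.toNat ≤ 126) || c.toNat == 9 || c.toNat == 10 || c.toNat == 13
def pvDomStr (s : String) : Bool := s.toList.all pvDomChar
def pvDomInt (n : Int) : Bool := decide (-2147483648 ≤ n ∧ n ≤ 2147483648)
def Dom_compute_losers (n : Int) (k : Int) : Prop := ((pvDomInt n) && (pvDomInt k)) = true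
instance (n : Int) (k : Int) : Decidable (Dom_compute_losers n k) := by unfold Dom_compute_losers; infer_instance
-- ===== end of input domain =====

-- B replaces A's per-position scan of all known losers (choose_move/valid_move) by direct
-- generation of the O(n²·k) lowerings of one contiguous block of a to a single value, each
-- looked up in a hash set of losers; objective: alternative (hash lookup instead of inner scan).

-- Fuel bound shared by both loop ports (a totality guard, not part of either algorithm):
-- C(n+k, k) ≥ the number of positions the enumeration can visit.
def pvFuel (n k : Nat) : Nat :=
  (List.range (min n k)).foldl (fun acc i => acc * (n + k - i) / (i + 1)) 1

-- Advance `a` to the next position (Python `next(a, k)`, identical inline code in both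
-- Pythons): scan from the right past entries equal to k, increment, fill the tail.
-- Ported on the reversed list.
def nextRev (k : Int) : List Int → List Int
  | [] => []
  | x :: xs =>
    if x = k then
      match nextRev k xs with
      | [] => []
      | y :: ys => y :: y :: ys
    else (x + 1) :: xs

def nextPos (a : List Int) (k : Int) : List Int := (nextRev k a.reverse).reverse

-- ===== PORT A =====
def valid_move_loop : List Int → List Int → Option Int → Bool
  | [], _, bite => bite.isSome
  | _ :: _, [], bite => bite.isSome   -- unreachable in compute_losers (equal lengths)
  | x :: xs, y :: ys, bite =>
    if x < y then false
    else if y < x then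
      match bite with
      | none => valid_move_loop xs ys (some y)
      | some w => if w = y then valid_move_loop xs ys (some y) else false
    else valid_move_loop xs ys bite

def valid_move (a b : List Int) : Bool := valid_move_loop a b none

def choose_move (a : List Int) : List (List Int) → Option (List Int)
  | [] => none
  | l :: ls => if valid_move a l then some l else choose_move a ls

def clLoopA (k : Int) : Nat → List Int → List (List Int) → List (List Int)
  | 0, _, losers => losers
  | fuel + 1, a, losers =>
    if PySem.List.pyGetD a 0 0 < k then
      let a' := nextPos a k
      let losers' := if (choose_move a' losers).isNone then losers ++ [a'] else losers
      clLoopA k fuel a' losers'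
    else losers

def compute_losers (n : Int) (k : Int) : List (List Int) :=
  clLoopA k (pvFuel n.toNat k.toNat) (List.replicate n.toNat 0) []

-- ===== PORT B =====
-- tuple(a[:s]) + (v,)*(e-s+1) + tuple(a[e+1:])
def lowerCand (a : List Int) (s e : Nat) (v : Int) : List Int :=
  a.take s ++ List.replicate (e - s + 1) v ++ a.drop (e + 1)

def hasLosingMove (a : List Int) (lset : PySem.Set (List Int)) : Bool :=
  (List.range a.length).any fun s =>
    let lo := if 0 < s then a.getD (s - 1) 0 else 0
    (PySem.List.pyRange lo (a.getD s 0) 1).any fun v =>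
      (List.range (a.length - s)).any fun t =>
        PySem.Set.contains lset (lowerCand a s (s + t) v)

def clLoopB (k : Int) : Nat → List Int → List (List Int) → PySem.Set (List Int) → List (List Int)
  | 0, _, losers, _ => losers
  | fuel + 1, a, losers, lset =>
    if PySem.List.pyGetD a 0 0 < k then
      let a' := nextPos a k
      if hasLosingMove a' lset then clLoopB k fuel a' losers lset
      else clLoopB k fuel a' (losers ++ [a']) (PySem.Set.add lset a')
    else losers

def compute_losers_alt (n : Int) (k : Int) : List (List Int) :=
  clLoopB k (pvFuel n.toNat k.toNat) (List.replicate n.toNat 0) [] PySem.Set.empty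

-- ===== PRECONDITION & SPEC =====
-- Pre_ excludes only n ≤ 0, where the Python A always raises IndexError (a = n*[0] is empty
-- and the loop condition reads a[0]).
def Pre_compute_losers (n : Int) (k : Int) : Prop := 1 ≤ n
instance (n : Int) (k : Int) : Decidable (Pre_compute_losers n k) := by
  unfold Pre_compute_losers; infer_instance

def pvWitness_compute_losers : Int × Int := (2, 2)

def Spec_compute_losers (n : Int) (k : Int) (out : List (List Int)) : Prop :=
  out = compute_losers_alt n k
instance (n : Int) (k : Int) (out : List (List Int)) : Decidable (Spec_compute_losers n k out) := by
  unfold Spec_compute_losers; infer_instance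

-- ===== CLAIM (what is proved, stated in full; the proofs are below) =====
def Claim_equal_compute_losers : Prop :=
  ∀ (n : Int) (k : Int), Dom_compute_losers n k → Pre_compute_losers n k →
    Spec_compute_losers n k (compute_losers n k)

-- ===== LEMMAS AND PROOFS =====

-- a position of the enumeration: non-decreasing, entries in [0, k]
def PosOK (k : Int) (xs : List Int) : Prop :=
  List.Pairwise (· ≤ ·) xs ∧ ∀ x ∈ xs, 0 ≤ x ∧ x ≤ k

theorem vm_refl (q : List Int) (bite : Option Int) : valid_move_loop q q bite = bite.isSome := by
  induction q generalizing bite with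
  | nil => rfl
  | cons x xs ih => simp [valid_move_loop, ih]

theorem vm_skip (p : List Int) (u w : List Int) (bite : Option Int) :
    valid_move_loop (p ++ u) (p ++ w) bite = valid_move_loop u w bite := by
  induction p generalizing bite with
  | nil => rfl
  | cons x xs ih => simp [valid_move_loop, ih]

theorem vm_mid (v : Int) (q : List Int) (mid : List Int) (h : ∀ x ∈ mid, v < x) :
    valid_move_loop (mid ++ q) (List.replicate mid.length v ++ q) (some v) =
      valid_move_loop q q (some v) := by
  induction mid with
  | nil => rfl
  | cons x xs ih =>
    have hx := h x (by simp)
    rw [List.length_cons, List.replicate_succ]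
    simp only [List.cons_append, valid_move_loop, if_neg (not_lt_of_gt hx), if_pos hx]
    exact ih (fun y hy => h y (by simp [hy]))
theorem vm_eq_of_gt (v : Int) : ∀ (a b : List Int), b.length = a.length →
    (∀ w ∈ b, v < w) → valid_move_loop a b (some v) = true → b = a := by
  intro a
  induction a with
  | nil => intro b hl _ _; exact List.eq_nil_of_length_eq_zero hl
  | cons x xs ih =>
    intro b hl hw hv
    cases b with
    | nil => simp at hl
    | cons y ys =>
      have hy := hw y (by simp)
      simp only [valid_move_loop] at hv
      split_ifs at hv with h1 h2 he
      · omega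
      · have : y = x := by omega
        subst this
        rw [ih ys (by simpa using hl) (fun w hww => hw w (by simp [hww])) hv]

theorem vm_rep (v : Int) : ∀ (a b : List Int), b.length = a.length →
    List.Pairwise (· ≤ ·) a → List.Pairwise (· ≤ ·) b → (∀ z ∈ a, v < z) →
    valid_move_loop a b (some v) = true →
    ∃ j, j ≤ a.length ∧ b = List.replicate j v ++ a.drop j := by
  intro a
  induction a with
  | nil =>
    intro b hl _ _ _ _
    exact ⟨0, by simp, by simpa using List.eq_nil_of_length_eq_zero hl⟩
  | cons x xs ih =>
    intro b hl ha hb hz hv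
    cases b with
    | nil => simp at hl
    | cons y ys =>
      have hx := hz x (by simp)
      simp only [valid_move_loop] at hv
      split_ifs at hv with h1 h2 he
      · -- strict at head with v = y
        subst he
        obtain ⟨j, hj, hys⟩ := ih ys (by simpa using hl) (List.Pairwise.of_cons ha)
          (List.Pairwise.of_cons hb) (fun z hzz => hz z (by simp [hzz])) hv
        exact ⟨j + 1, by simpa using Nat.succ_le_succ hj, by simp [List.replicate_succ, hys]⟩
      · -- equal at head
        have : y = x := by omega
        subst this
        have hys : ys = xs := by
          apply vm_eq_of_gt v xs ys (by simpa using hl)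
          · intro w hww
            have := (List.pairwise_cons.mp hb).1 w hww
            omega
          · exact hv
        exact ⟨0, by simp, by simp [hys]⟩
theorem drop_sorted_ge (a : List Int) (ha : List.Pairwise (· ≤ ·) a) (s : Nat)
    (hs : s < a.length) : ∀ x ∈ a.drop s, a.getD s 0 ≤ x := by
  have hd : a.drop s = a[s] :: a.drop (s + 1) := List.drop_eq_getElem_cons hs
  rw [List.getD_eq_getElem a 0 hs, hd]
  have hp : List.Pairwise (· ≤ ·) (a.drop s) := List.Pairwise.drop ha
  rw [hd] at hp
  intro x hx
  rcases List.mem_cons.mp hx with h | h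
  · omega
  · exact (List.pairwise_cons.mp hp).1 x h

theorem cand_valid (a : List Int) (ha : List.Pairwise (· ≤ ·) a) (s e : Nat) (v : Int)
    (hs : s ≤ e) (he : e < a.length) (hv : v < a.getD s 0) :
    valid_move a (lowerCand a s e v) = true := by
  have hs' : s < a.length := Nat.lt_of_le_of_lt hs he
  set mid := (a.drop s).take (e - s + 1) with hmid
  have hmlen : mid.length = e - s + 1 := by
    simp [hmid, List.length_take, List.length_drop]; omega
  have hsplit : a = a.take s ++ (mid ++ a.drop (e + 1)) := by
    rw [hmid]
    conv_lhs => rw [← List.take_append_drop s a]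
    congr 1
    conv_lhs => rw [← List.take_append_drop (e - s + 1) (a.drop s)]
    rw [List.drop_drop]
    congr 2
    omega
  have hgt : ∀ x ∈ mid, v < x := by
    intro x hx
    have := drop_sorted_ge a ha s hs' x (List.mem_of_mem_take hx)
    omega
  have hmid_ne : mid ≠ [] := by
    intro h; rw [h] at hmlen; simp at hmlen
  obtain ⟨c, rest, hc⟩ := List.exists_cons_of_ne_nil hmid_ne
  have hcand : lowerCand a s e v = a.take s ++ (List.replicate mid.length v ++ a.drop (e + 1)) := by
    rw [hmlen]; simp [lowerCand]
  unfold valid_move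
  rw [hcand]
  nth_rewrite 1 [hsplit]
  rw [vm_skip]
  rw [hc]
  have hcgt : v < c := hgt c (by rw [hc]; simp)
  simp only [List.length_cons, List.replicate_succ, List.cons_append, valid_move_loop,
    if_neg (not_lt_of_gt hcgt), if_pos hcgt]
  rw [vm_mid v _ rest (fun y hy => hgt y (by rw [hc]; simp [hy])), vm_refl]
  rfl
theorem valid_cand : ∀ (a b : List Int), List.Pairwise (· ≤ ·) a →
    List.Pairwise (· ≤ ·) b → (∀ x ∈ b, 0 ≤ x) → b.length = a.length →
    valid_move a b = true →
    ∃ s e v, s ≤ e ∧ e < a.length ∧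
      (if 0 < s then a.getD (s - 1) 0 else 0) ≤ v ∧ v < a.getD s 0 ∧ b = lowerCand a s e v := by
  intro a
  induction a with
  | nil =>
    intro b _ _ _ hl hv
    have : b = [] := List.eq_nil_of_length_eq_zero hl
    subst this
    exact absurd hv (by simp [valid_move, valid_move_loop])
  | cons x xs ih =>
    intro b ha hb hb0 hl hv
    cases b with
    | nil => simp at hl
    | cons y ys =>
      simp only [valid_move, valid_move_loop] at hv
      split_ifs at hv with h1 h2
      · -- y < x : strict at the head, v = y
        refine ⟨0, ?_⟩
        obtain ⟨j, hj, hys⟩ := vm_rep y xs ys (by simpa using hl) (List.Pairwise.of_cons ha)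
          (List.Pairwise.of_cons hb)
          (fun z hz => lt_of_lt_of_le h2 ((List.pairwise_cons.mp ha).1 z hz)) hv
        refine ⟨j, y, by omega, by simp; omega, by simp [hb0 y (by simp)], by simp; omega, ?_⟩
        simp only [lowerCand, List.take_zero, Nat.sub_zero, List.drop_succ_cons,
          List.nil_append]
        rw [List.replicate_succ]
        simp [hys]
      · -- x = y : heads equal, lift the decomposition of the tails
        have hxy : y = x := by omega
        subst hxy
        obtain ⟨s, e, v, hse, he, hlo, hv', hys⟩ := ih ys (List.Pairwise.of_cons ha)
          (List.Pairwise.of_cons hb) (fun z hz => hb0 z (by simp [hz])) (by simpa using hl) hv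
        refine ⟨s + 1, e + 1, v, by omega, by simp; omega, ?_, ?_, ?_⟩
        · -- lower bound
          simp only [Nat.add_sub_cancel]
          rcases Nat.eq_zero_or_pos s with hs0 | hs0
          · subst hs0
            simp only [List.getD_cons_zero]
            -- y = x ≤ v since v is the head block value of ys
            have hvmem : v ∈ ys := by
              rw [hys]
              simp [lowerCand]
            exact (List.pairwise_cons.mp hb).1 v hvmem
          · rw [if_pos (by omega : 0 < s)] at hlo
            obtain ⟨s', rfl⟩ : ∃ s', s = s' + 1 := ⟨s - 1, by omega⟩
            simpa using hlo
        · simpa using hv'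
        · rw [hys]
          simp [lowerCand]
theorem choose_move_none_iff (a : List Int) (L : List (List Int)) :
    (choose_move a L).isNone = true ↔ ∀ b ∈ L, valid_move a b = false := by
  induction L with
  | nil => simp [choose_move]
  | cons l ls ih =>
    by_cases h : valid_move a l
    · simp [choose_move, h]
    · have hf : valid_move a l = false := by simpa using h
      simp [choose_move, hf, ih]

theorem hlm_iff (a : List Int) (lset : PySem.Set (List Int)) :
    hasLosingMove a lset = true ↔
      ∃ s e v, s ≤ e ∧ e < a.length ∧
        (if 0 < s then a.getD (s - 1) 0 else 0) ≤ v ∧ v < a.getD s 0 ∧ lowerCand a s e v ∈ lset := by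
  unfold hasLosingMove
  simp only [List.any_eq_true, List.mem_range, PySem.List.mem_pyRange_one,
    PySem.Set.contains_iff]
  constructor
  · rintro ⟨s, hs, v, ⟨hlo, hv⟩, t, ht, hmem⟩
    exact ⟨s, s + t, v, by omega, by omega, hlo, hv, hmem⟩
  · rintro ⟨s, e, v, hse, he, hlo, hv, hmem⟩
    refine ⟨s, by omega, v, ⟨hlo, hv⟩, e - s, by omega, ?_⟩
    have : s + (e - s) = e := by omega
    rw [this]
    exact hmem

theorem check_iff (k : Int) (a : List Int) (L : List (List Int)) (lset : PySem.Set (List Int))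
    (ha : PosOK k a)
    (hL : ∀ b ∈ L, PosOK k b ∧ b.length = a.length)
    (hmem : ∀ b, b ∈ lset ↔ b ∈ L) :
    hasLosingMove a lset = (choose_move a L).isSome := by
  rw [Bool.eq_iff_iff]
  rw [hlm_iff]
  have hnone : (choose_move a L).isSome = true ↔ ¬ ((choose_move a L).isNone = true) := by
    cases choose_move a L <;> simp
  rw [hnone, choose_move_none_iff]
  push Not
  constructor
  · rintro ⟨s, e, v, hse, he, hlo, hv, hm⟩
    refine ⟨lowerCand a s e v, (hmem _).mp hm, ?_⟩
    simp [cand_valid a ha.1 s e v hse he hv]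
  · rintro ⟨b, hbL, hbv⟩
    obtain ⟨⟨hbs, hbb⟩, hblen⟩ := hL b hbL
    have hbv' : valid_move a b = true := by simpa using hbv
    obtain ⟨s, e, v, hse, he, hlo, hv, hbeq⟩ :=
      valid_cand a b ha.1 hbs (fun x hx => (hbb x hx).1) hblen hbv'
    exact ⟨s, e, v, hse, he, hlo, hv, (hmem _).mpr (hbeq ▸ hbL)⟩
theorem nextRev_spec (k x : Int) (p : List Int) (hx : x ≠ k) : ∀ (j : Nat),
    nextRev k (List.replicate j k ++ x :: p) = List.replicate j (x + 1) ++ (x + 1) :: p := by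
  intro j
  induction j with
  | zero => simp [nextRev, hx]
  | succ j ih =>
    rw [List.replicate_succ, List.cons_append, nextRev, if_pos rfl, ih]
    cases j <;> simp [List.replicate_succ]

theorem decomp_left (k : Int) : ∀ (r : List Int), (∃ y ∈ r, y ≠ k) →
    ∃ j x p, r = List.replicate j k ++ x :: p ∧ x ≠ k := by
  intro r
  induction r with
  | nil => rintro ⟨y, hy, _⟩; simp at hy
  | cons z rs ih =>
    rintro ⟨y, hy, hyk⟩
    by_cases hz : z = k
    · subst hz
      have hyrs : y ∈ rs := by
        rcases List.mem_cons.mp hy with h | h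
        · exact absurd h hyk
        · exact h
      obtain ⟨j, x, p, hr, hxk⟩ := ih ⟨y, hyrs, hyk⟩
      exact ⟨j + 1, x, p, by rw [List.replicate_succ, List.cons_append, hr], hxk⟩
    · exact ⟨0, z, rs, by simp, hz⟩

theorem nextPos_spec (k : Int) (a : List Int) (hne : a ≠ []) (ha : PosOK k a)
    (hlt : PySem.List.pyGetD a 0 0 < k) :
    PosOK k (nextPos a k) ∧ (nextPos a k).length = a.length := by
  obtain ⟨hs, hbd⟩ := ha
  have hh : a.getD 0 0 < k := by
    have := PySem.List.pyGetD_zero (xs := a) (d := (0:Int))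
    rw [this] at hlt
    exact hlt
  obtain ⟨c, cs, hc⟩ := List.exists_cons_of_ne_nil hne
  have hck : c ≠ k := by rw [hc] at hh; simp at hh; omega
  have hrex : ∃ y ∈ a.reverse, y ≠ k := ⟨c, by simp [hc], hck⟩
  obtain ⟨j, x, p, hrv, hxk⟩ := decomp_left k a.reverse hrex
  have hxk' : x ≤ k := (hbd x (by rw [← List.mem_reverse, hrv]; simp)).2
  have hx0 : 0 ≤ x := (hbd x (by rw [← List.mem_reverse, hrv]; simp)).1
  have ha_eq : a = p.reverse ++ x :: List.replicate j k := by
    have := congrArg List.reverse hrv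
    simpa [List.reverse_append, List.reverse_replicate] using this
  have hnp : nextPos a k = p.reverse ++ (x + 1) :: List.replicate j (x + 1) := by
    unfold nextPos
    rw [hrv, nextRev_spec k x p hxk j]
    simp [List.reverse_append, List.reverse_replicate]
  constructor
  · constructor
    · -- sorted
      rw [hnp]
      rw [ha_eq] at hs
      rw [List.pairwise_append] at hs ⊢
      obtain ⟨hp, hxs, hcross⟩ := hs
      refine ⟨hp, ?_, ?_⟩
      · rw [List.pairwise_cons]
        refine ⟨fun b hb => ?_, ?_⟩
        · rw [List.eq_of_mem_replicate hb]
        · exact List.pairwise_replicate.mpr (by simp)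
      · intro u hu w hw
        have hux : u ≤ x := hcross u hu x (by simp)
        have : w = x + 1 := by
          rcases List.mem_cons.mp hw with h | h
          · exact h
          · exact List.eq_of_mem_replicate h
        omega
    · -- bounds
      rw [hnp]
      intro z hz
      rcases List.mem_append.mp hz with h | h
      · exact hbd z (by rw [ha_eq]; exact List.mem_append.mpr (Or.inl h))
      · have hz1 : z = x + 1 := by
          rcases List.mem_cons.mp h with h' | h'
          · exact h'
          · exact List.eq_of_mem_replicate h'
        constructor <;> omega
  · rw [hnp, ha_eq]
    simp
theorem loop_eq (k : Int) : ∀ (fuel : Nat) (a : List Int) (L : List (List Int))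
    (lset : PySem.Set (List Int)), a ≠ [] → PosOK k a →
    (∀ b ∈ L, PosOK k b ∧ b.length = a.length) → (∀ b, b ∈ lset ↔ b ∈ L) →
    clLoopA k fuel a L = clLoopB k fuel a L lset := by
  intro fuel
  induction fuel with
  | zero => intro a L lset _ _ _ _; rfl
  | succ fuel ih =>
    intro a L lset hne ha hL hmem
    rw [clLoopA, clLoopB]
    by_cases hc : PySem.List.pyGetD a 0 0 < k
    · rw [if_pos hc, if_pos hc]
      simp only
      obtain ⟨ha', hlen'⟩ := nextPos_spec k a hne ha hc
      have hne' : nextPos a k ≠ [] := by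
        intro h
        rw [h] at hlen'
        exact hne (List.eq_nil_of_length_eq_zero hlen'.symm)
      have hL' : ∀ b ∈ L, PosOK k b ∧ b.length = (nextPos a k).length := by
        intro b hb
        exact ⟨(hL b hb).1, by rw [(hL b hb).2, hlen']⟩
      have hck := check_iff k (nextPos a k) L lset ha' hL' hmem
      by_cases hw : hasLosingMove (nextPos a k) lset = true
      · -- winner: losers unchanged
        have : (choose_move (nextPos a k) L).isNone = false := by
          rw [hck] at hw
          cases h : choose_move (nextPos a k) L
          · rw [h] at hw; simp at hw
          · simp
        rw [hw, this]
        simp only [Bool.false_eq_true, if_false]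
        exact ih (nextPos a k) L lset hne' ha' hL' hmem
      · -- loser: append
        have hwf : hasLosingMove (nextPos a k) lset = false := by simpa using hw
        have : (choose_move (nextPos a k) L).isNone = true := by
          rw [hck] at hwf
          cases h : choose_move (nextPos a k) L
          · simp
          · rw [h] at hwf; simp at hwf
        rw [hwf, this]
        simp only [if_true, Bool.false_eq_true, if_false]
        apply ih (nextPos a k) (L ++ [nextPos a k]) (PySem.Set.add lset (nextPos a k)) hne' ha'
        · intro b hb
          rcases List.mem_append.mp hb with h | h
          · exact hL' b h
          · rw [List.mem_singleton.mp h]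
            exact ⟨ha', rfl⟩
        · intro b
          rw [PySem.Set.mem_add, hmem b]
          simp
    · rw [if_neg hc, if_neg hc]
theorem final_eq (n k : Int) (hpre : 1 ≤ n) : compute_losers n k = compute_losers_alt n k := by
  unfold compute_losers compute_losers_alt
  have hn : 1 ≤ n.toNat := by omega
  by_cases hk : (0 : Int) < k
  · apply loop_eq
    · intro h
      rw [List.replicate_eq_nil_iff] at h
      omega
    · constructor
      · exact List.pairwise_replicate.mpr (by simp)
      · intro x hx
        rw [List.eq_of_mem_replicate hx]
        constructor <;> omega
    · intro b hb
      simp at hb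
    · intro b
      simp [PySem.Set.empty]
  · cases hf : pvFuel n.toNat k.toNat with
    | zero => rfl
    | succ m =>
      have hc : ¬ PySem.List.pyGetD (List.replicate n.toNat 0) 0 0 < k := by
        rw [PySem.List.pyGetD_zero]
        obtain ⟨m', hm⟩ : ∃ m', n.toNat = m' + 1 := ⟨n.toNat - 1, by omega⟩
        rw [hm, List.replicate_succ]
        simpa using hk
      rw [clLoopA, clLoopB, if_neg hc, if_neg hc]

-- ===== VERDICT (by name: the statement is the Claim_ definition above) =====
theorem compute_losers_spec : Claim_equal_compute_losers := by
  intro n k _ hpre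
  show compute_losers n k = compute_losers_alt n k
  exact final_eq n k hpre
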